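-- pv_equiv track=rewrite | github.com/sngmng6506/WL-graph-kernel | graph-kernel.py | multi_labeling
-- ===== SOURCE A (Python) =====
-- def multi_labeling(G1,adj1):
--     G = G1.copy()
--
--     #labeling
--     for x, j in enumerate(adj1):
--         for y, k in enumerate(j):
--             if k != 0:
--                 link = (x, y)
--
--                 if x == y:
--                     continue
--                 else:
--                     G[x] += G1[y]
--     #sorting
--     for i in G:
--         G[i] = ''.join(sorted(G[i]))
--     return G
-- ===== SOURCE B (Python) =====
-- def multi_labeling(G1, adj1):
--     # Per-node pass with a character counter: each node's result is built
--     # directly from its own adjacency row, expanded by counting sort.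
--     n = len(adj1)
--     out = {}
--     for x, lab in G1.items():
--         cnt = {}
--         for ch in lab:
--             cnt[ch] = cnt.get(ch, 0) + 1
--         if 0 <= x < n:
--             for y, k in enumerate(adj1[x]):
--                 if k != 0 and y != x:
--                     for ch in G1[y]:
--                         cnt[ch] = cnt.get(ch, 0) + 1
--         out[x] = ''.join(ch * cnt[ch] for ch in sorted(cnt))
--     return out
-- ===== Notes on version B (the rewrite author's own statement) =====
-- stated objective: alternative
-- what changed: A mutates a copied dict in two passes (concatenating neighbor label strings per nonzero off-diagonal entry, then sorting each accumulated string with sorted()); B instead builds each node's result independently from that node's own adjacency row using a character-count dictionary and expands the counts in sorted character order (counting sort), so no intermediate concatenated strings are sorted.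
import Mathlib
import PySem

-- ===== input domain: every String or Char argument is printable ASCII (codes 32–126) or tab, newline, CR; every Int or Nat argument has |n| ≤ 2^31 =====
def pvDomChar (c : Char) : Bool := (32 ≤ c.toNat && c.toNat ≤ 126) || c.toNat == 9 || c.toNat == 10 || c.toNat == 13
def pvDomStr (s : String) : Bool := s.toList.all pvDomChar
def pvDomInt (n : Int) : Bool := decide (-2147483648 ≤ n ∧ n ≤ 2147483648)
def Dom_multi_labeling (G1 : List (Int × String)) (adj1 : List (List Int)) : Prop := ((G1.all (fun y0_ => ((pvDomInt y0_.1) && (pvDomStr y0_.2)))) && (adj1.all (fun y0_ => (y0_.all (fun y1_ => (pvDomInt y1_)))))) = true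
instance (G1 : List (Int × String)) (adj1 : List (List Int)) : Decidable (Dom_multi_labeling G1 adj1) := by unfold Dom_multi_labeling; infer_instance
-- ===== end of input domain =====

-- B rebuilds each node's label per node from its own adjacency row with a character
-- counter expanded in sorted character order (counting sort), instead of A's two passes
-- of dict mutation (string concatenation, then sorted()); equivalence proved on Pre_.


-- ===== PORT A =====
def multi_labeling (G1 : List (Int × String)) (adj1 : List (List Int)) : List (Int × String) :=
  let d1 : PySem.Dict Int String := PySem.Dict.mk G1
  let G : PySem.Dict Int String :=
    (PySem.List.enumerate adj1).foldl (fun G xj =>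
      (PySem.List.enumerate xj.2).foldl (fun G yk =>
        if yk.2 ≠ 0 then
          if xj.1 == yk.1 then G
          else G.insert xj.1 (G.getD xj.1 "" ++ d1.getD yk.1 "")
        else G) G) d1
  ((PySem.Dict.keys G).foldl (fun G i =>
    G.insert i (String.ofList (PySem.List.sorted (G.getD i "").toList (fun c => c) false))) G).items

-- ===== PORT B =====
def multi_labeling_alt (G1 : List (Int × String)) (adj1 : List (List Int)) : List (Int × String) :=
  let d1 : PySem.Dict Int String := PySem.Dict.mk G1
  let n : Int := adj1.length
  (d1.items.foldl (fun out xl =>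
    let cnt : PySem.Dict Char Int :=
      xl.2.toList.foldl (fun c ch => c.insert ch (c.getD ch 0 + 1)) PySem.Dict.empty
    let cnt :=
      if 0 ≤ xl.1 ∧ xl.1 < n then
        (PySem.List.enumerate (PySem.List.pyGetD adj1 xl.1 [])).foldl (fun c yk =>
          if yk.2 ≠ 0 ∧ yk.1 ≠ xl.1 then
            (d1.getD yk.1 "").toList.foldl (fun c ch => c.insert ch (c.getD ch 0 + 1)) c
          else c) cnt
      else cnt
    out.insert xl.1 (String.ofList ((PySem.List.sorted cnt.keys (fun c => c) false).flatMap
      (fun ch => List.replicate (cnt.getD ch 0).toNat ch))))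
    (PySem.Dict.empty : PySem.Dict Int String)).items

-- ===== PRECONDITION & SPEC =====
-- Pre_ excludes inputs where A raises KeyError (a nonzero off-diagonal matrix entry whose row or
-- column index is not a key of G1), and association lists with duplicate keys, which a Python
-- dict cannot represent.
def Pre_multi_labeling (G1 : List (Int × String)) (adj1 : List (List Int)) : Prop :=
  (G1.map Prod.fst).Nodup ∧
  ∀ p ∈ PySem.List.enumerate adj1, ∀ q ∈ PySem.List.enumerate p.2,
    q.2 ≠ 0 → q.1 ≠ p.1 → p.1 ∈ G1.map Prod.fst ∧ q.1 ∈ G1.map Prod.fst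
instance (G1 : List (Int × String)) (adj1 : List (List Int)) : Decidable (Pre_multi_labeling G1 adj1) := by unfold Pre_multi_labeling; infer_instance

def pvWitness_multi_labeling : (List (Int × String)) × List (List Int) :=
  ([(0, "ba"), (1, "c")], [[0, 1], [1, 0]])

def Spec_multi_labeling (G1 : List (Int × String)) (adj1 : List (List Int)) (out : List (Int × String)) : Prop := out = multi_labeling_alt G1 adj1
instance (G1 : List (Int × String)) (adj1 : List (List Int)) (out : List (Int × String)) : Decidable (Spec_multi_labeling G1 adj1 out) := by unfold Spec_multi_labeling; infer_instance

-- ===== CLAIM (what is proved, stated in full; the proofs are below) =====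
def Claim_equal_multi_labeling : Prop := ∀ (G1 : List (Int × String)) (adj1 : List (List Int)), Dom_multi_labeling G1 adj1 → Pre_multi_labeling G1 adj1 → Spec_multi_labeling G1 adj1 (multi_labeling G1 adj1)

-- ===== LEMMAS AND PROOFS =====
def pvRowChars (d1 : PySem.Dict Int String) (x : Int) (j : List Int) (s : Int) : List Char :=
  ((PySem.List.enumerate j s).filter (fun yk => yk.2 != 0 && yk.1 != x)).flatMap
    (fun yk => (d1.getD yk.1 "").toList)

lemma pv_rowChars_nil (d1 : PySem.Dict Int String) (x : Int) (j : List Int) (s : Int)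
    (h : ∀ q ∈ PySem.List.enumerate j s, q.2 = 0 ∨ q.1 = x) :
    pvRowChars d1 x j s = [] := by
  unfold pvRowChars
  have : (PySem.List.enumerate j s).filter (fun yk => yk.2 != 0 && yk.1 != x) = [] := by
    refine List.filter_eq_nil_iff.mpr ?_
    intro q hq
    rcases h q hq with h1 | h1 <;> simp [h1]
  rw [this, List.flatMap_nil]

lemma pv_innerA (d1 : PySem.Dict Int String) (x : Int) (j : List Int) (s : Int)
    (d : PySem.Dict Int String) (hx : x ∈ d.keys) :
    ((PySem.List.enumerate j s).foldl (fun G yk =>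
        if yk.2 ≠ 0 then
          if x == yk.1 then G
          else G.insert x (G.getD x "" ++ d1.getD yk.1 "")
        else G) d).keys = d.keys ∧
    ∀ z, (((PySem.List.enumerate j s).foldl (fun G yk =>
        if yk.2 ≠ 0 then
          if x == yk.1 then G
          else G.insert x (G.getD x "" ++ d1.getD yk.1 "")
        else G) d).getD z "").toList
      = (d.getD z "").toList ++ (if z = x then pvRowChars d1 x j s else []) := by
  induction j generalizing s d with
  | nil =>
    simp [PySem.List.enumerate_nil, pvRowChars]
  | cons a j ih =>
    rw [PySem.List.enumerate_cons]
    simp only [List.foldl_cons]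
    by_cases ha : a = 0
    · have hstep : (if a ≠ 0 then (if x == s then d else d.insert x (d.getD x "" ++ d1.getD s "")) else d) = d := by
        simp [ha]
      rw [hstep]
      obtain ⟨ihk, ihv⟩ := ih (s+1) d hx
      refine ⟨ihk, fun z => ?_⟩
      rw [ihv z]
      have : pvRowChars d1 x (a :: j) s = pvRowChars d1 x j (s+1) := by
        unfold pvRowChars
        rw [PySem.List.enumerate_cons]
        simp [ha]
      rw [this]
    · by_cases hxs : x = s
      · have hstep : (if a ≠ 0 then (if x == s then d else d.insert x (d.getD x "" ++ d1.getD s "")) else d) = d := by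
          simp [ha, hxs]
        rw [hstep]
        obtain ⟨ihk, ihv⟩ := ih (s+1) d hx
        refine ⟨ihk, fun z => ?_⟩
        rw [ihv z]
        have : pvRowChars d1 x (a :: j) s = pvRowChars d1 x j (s+1) := by
          unfold pvRowChars
          rw [PySem.List.enumerate_cons]
          simp [hxs]
        rw [this]
      · have hstep : (if a ≠ 0 then (if x == s then d else d.insert x (d.getD x "" ++ d1.getD s "")) else d)
            = d.insert x (d.getD x "" ++ d1.getD s "") := by
          simp [ha, hxs]
        rw [hstep]
        have hx' : x ∈ (d.insert x (d.getD x "" ++ d1.getD s "")).keys := by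
          rw [PySem.Dict.keys_insert_of_contains d _ ((PySem.Dict.contains_iff_mem_keys d x).mpr hx)]
          exact hx
        obtain ⟨ihk, ihv⟩ := ih (s+1) (d.insert x (d.getD x "" ++ d1.getD s "")) hx'
        have hkeq : (d.insert x (d.getD x "" ++ d1.getD s "")).keys = d.keys :=
          PySem.Dict.keys_insert_of_contains d _ ((PySem.Dict.contains_iff_mem_keys d x).mpr hx)
        refine ⟨ihk.trans hkeq, fun z => ?_⟩
        rw [ihv z]
        have hrow : pvRowChars d1 x (a :: j) s = (d1.getD s "").toList ++ pvRowChars d1 x j (s+1) := by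
          unfold pvRowChars
          rw [PySem.List.enumerate_cons]
          have : Ne s x := fun h => hxs h.symm
          simp [ha, this]
        by_cases hz : z = x
        · subst hz
          rw [PySem.Dict.getD_insert_self, hrow, String.toList_append]
          simp
        · rw [PySem.Dict.getD_insert_of_ne _ _ _ hz]
          simp [hz]

lemma pv_innerA_inactive (d1 : PySem.Dict Int String) (x : Int) (j : List Int) (s : Int)
    (d : PySem.Dict Int String) (h : ∀ q ∈ PySem.List.enumerate j s, q.2 = 0 ∨ q.1 = x) :
    (PySem.List.enumerate j s).foldl (fun G yk =>
        if yk.2 ≠ 0 then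
          if x == yk.1 then G
          else G.insert x (G.getD x "" ++ d1.getD yk.1 "")
        else G) d = d := by
  induction j generalizing s with
  | nil => simp [PySem.List.enumerate_nil]
  | cons a j ih =>
    rw [PySem.List.enumerate_cons]
    simp only [List.foldl_cons]
    have hhead := h (s, a) (by rw [PySem.List.enumerate_cons]; exact List.mem_cons_self ..)
    have hstep : (if a ≠ 0 then (if x == s then d else d.insert x (d.getD x "" ++ d1.getD s "")) else d) = d := by
      rcases hhead with h1 | h1 <;> simp at h1 <;> simp [h1]
    rw [hstep]
    exact ih (s+1) (fun q hq => h q (by rw [PySem.List.enumerate_cons]; exact List.mem_cons_of_mem _ hq))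

def pvNbChars (d1 : PySem.Dict Int String) (rows : List (List Int)) (s : Int) (z : Int) : List Char :=
  ((PySem.List.enumerate rows s).filter (fun p => p.1 == z)).flatMap
    (fun p => pvRowChars d1 z p.2 0)

lemma pv_outerA (d1 : PySem.Dict Int String) (rows : List (List Int)) (s : Int)
    (d : PySem.Dict Int String) (hkeys : d.keys = d1.keys)
    (hpre : ∀ p ∈ PySem.List.enumerate rows s, ∀ q ∈ PySem.List.enumerate p.2,
      q.2 ≠ 0 → q.1 ≠ p.1 → p.1 ∈ d1.keys) :
    ((PySem.List.enumerate rows s).foldl (fun G xj =>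
      (PySem.List.enumerate xj.2).foldl (fun G yk =>
        if yk.2 ≠ 0 then
          if xj.1 == yk.1 then G
          else G.insert xj.1 (G.getD xj.1 "" ++ d1.getD yk.1 "")
        else G) G) d).keys = d1.keys ∧
    ∀ z, (((PySem.List.enumerate rows s).foldl (fun G xj =>
      (PySem.List.enumerate xj.2).foldl (fun G yk =>
        if yk.2 ≠ 0 then
          if xj.1 == yk.1 then G
          else G.insert xj.1 (G.getD xj.1 "" ++ d1.getD yk.1 "")
        else G) G) d).getD z "").toList
      = (d.getD z "").toList ++ pvNbChars d1 rows s z := by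
  induction rows generalizing s d with
  | nil =>
    simp [PySem.List.enumerate_nil, pvNbChars]
    exact hkeys
  | cons j rest ih =>
    rw [PySem.List.enumerate_cons]
    simp only [List.foldl_cons]
    -- the inner fold on row (s, j)
    by_cases hact : ∀ q ∈ PySem.List.enumerate j 0, q.2 = 0 ∨ q.1 = s
    · -- row has no effect
      rw [pv_innerA_inactive d1 s j 0 d hact]
      obtain ⟨ihk, ihv⟩ := ih (s+1) d hkeys
        (fun p hp => hpre p (by rw [PySem.List.enumerate_cons]; exact List.mem_cons_of_mem _ hp))
      refine ⟨ihk, fun z => ?_⟩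
      rw [ihv z]
      have hnb : pvNbChars d1 (j :: rest) s z = (if s = z then pvRowChars d1 z j 0 else []) ++ pvNbChars d1 rest (s+1) z := by
        unfold pvNbChars
        rw [PySem.List.enumerate_cons]
        by_cases hz : s = z <;> simp [hz]
      rw [hnb]
      by_cases hz : s = z
      · subst hz
        rw [pv_rowChars_nil d1 s j 0 hact]
        simp
      · simp [hz]
    · -- some active entry: then s ∈ d1.keys
      push Not at hact
      obtain ⟨q, hq, hq2, hq1⟩ := hact
      have hs : s ∈ d.keys := by
        rw [hkeys]
        exact hpre (s, j) (by rw [PySem.List.enumerate_cons]; exact List.mem_cons_self ..) q hq hq2 hq1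
      obtain ⟨ik, iv⟩ := pv_innerA d1 s j 0 d hs
      set d' := (PySem.List.enumerate j 0).foldl (fun G yk =>
          if yk.2 ≠ 0 then if s == yk.1 then G else G.insert s (G.getD s "" ++ d1.getD yk.1 "") else G) d with hd'
      obtain ⟨ihk, ihv⟩ := ih (s+1) d' (ik.trans hkeys)
        (fun p hp => hpre p (by rw [PySem.List.enumerate_cons]; exact List.mem_cons_of_mem _ hp))
      refine ⟨ihk, fun z => ?_⟩
      rw [ihv z, iv z]
      have hnb : pvNbChars d1 (j :: rest) s z = (if s = z then pvRowChars d1 z j 0 else []) ++ pvNbChars d1 rest (s+1) z := by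
        unfold pvNbChars
        rw [PySem.List.enumerate_cons]
        by_cases hz : s = z <;> simp [hz]
      rw [hnb]
      by_cases hz : z = s
      · subst hz
        simp
      · have : ¬ (s = z) := fun h => hz h.symm
        simp [hz, this]

lemma pv_nbChars_closed (d1 : PySem.Dict Int String) (rows : List (List Int)) (s z : Int) :
    pvNbChars d1 rows s z =
      if s ≤ z ∧ z < s + rows.length then pvRowChars d1 z (rows.getD (z - s).toNat []) 0
      else [] := by
  induction rows generalizing s with
  | nil =>
    simp [pvNbChars, PySem.List.enumerate_nil]
  | cons j rest ih =>
    have hnb : pvNbChars d1 (j :: rest) s z = (if s = z then pvRowChars d1 z j 0 else []) ++ pvNbChars d1 rest (s+1) z := by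
      unfold pvNbChars
      rw [PySem.List.enumerate_cons]
      by_cases hz : s = z <;> simp [hz]
    rw [hnb, ih (s+1)]
    by_cases hz : s = z
    · subst hz
      have h1 : ¬ (s + 1 ≤ s ∧ s < s + 1 + rest.length) := by omega
      have h2 : (s ≤ s ∧ s < s + (j :: rest).length) := by simp
      rw [if_neg h1, if_pos h2]
      simp
    · by_cases h3 : s + 1 ≤ z ∧ z < s + 1 + rest.length
      · have h4 : s ≤ z ∧ z < s + (j :: rest).length := by simp; omega
        rw [if_pos h3, if_pos h4]
        have h5 : (z - s).toNat = (z - (s+1)).toNat + 1 := by omega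
        simp [hz, h5]
      · have h4 : ¬ (s ≤ z ∧ z < s + (j :: rest).length) := by simp; omega
        rw [if_neg h3, if_neg h4]
        simp [hz]

lemma pv_sortPass (ks : List Int) (d : PySem.Dict Int String) (hnd : ks.Nodup)
    (hsub : ∀ i ∈ ks, i ∈ d.keys) :
    (ks.foldl (fun G i =>
        G.insert i (String.ofList (PySem.List.sorted (G.getD i "").toList (fun c => c) false))) d).keys
      = d.keys ∧
    (∀ z ∈ ks, (ks.foldl (fun G i =>
        G.insert i (String.ofList (PySem.List.sorted (G.getD i "").toList (fun c => c) false))) d).getD z ""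
      = String.ofList (PySem.List.sorted (d.getD z "").toList (fun c => c) false)) ∧
    (∀ z, z ∉ ks → (ks.foldl (fun G i =>
        G.insert i (String.ofList (PySem.List.sorted (G.getD i "").toList (fun c => c) false))) d).getD z ""
      = d.getD z "") := by
  induction ks generalizing d with
  | nil => simp
  | cons i ks ih =>
    simp only [List.foldl_cons]
    have hik : i ∈ d.keys := hsub i (List.mem_cons_self ..)
    set d' := d.insert i (String.ofList (PySem.List.sorted (d.getD i "").toList (fun c => c) false)) with hd'
    have hk' : d'.keys = d.keys :=
      PySem.Dict.keys_insert_of_contains d _ ((PySem.Dict.contains_iff_mem_keys d i).mpr hik)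
    have hnd' : ks.Nodup := hnd.of_cons
    have hnotmem : i ∉ ks := (List.nodup_cons.mp hnd).1
    obtain ⟨ihk, ihv, ihnv⟩ := ih d' hnd' (fun a ha => hk' ▸ hsub a (List.mem_cons_of_mem _ ha))
    refine ⟨ihk.trans hk', ?_, ?_⟩
    · intro z hz
      rcases List.mem_cons.mp hz with rfl | hz'
      · rw [ihnv z hnotmem, hd', PySem.Dict.getD_insert_self]
      · rw [ihv z hz', hd']
        have hzi : z ≠ i := fun h => hnotmem (h ▸ hz')
        rw [PySem.Dict.getD_insert_of_ne _ _ _ hzi]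
    · intro z hz
      have hz1 : z ≠ i := fun h => hz (h ▸ List.mem_cons_self ..)
      have hz2 : z ∉ ks := fun h => hz (List.mem_cons_of_mem _ h)
      rw [ihnv z hz2, hd', PySem.Dict.getD_insert_of_ne _ _ _ hz1]

lemma pv_innerB (d1 : PySem.Dict Int String) (x : Int) (j : List Int) (s : Int)
    (c0 : PySem.Dict Char Int) :
    (PySem.List.enumerate j s).foldl (fun c yk =>
        if yk.2 ≠ 0 ∧ yk.1 ≠ x then
          (d1.getD yk.1 "").toList.foldl (fun c ch => c.insert ch (c.getD ch 0 + 1)) c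
        else c) c0
      = (pvRowChars d1 x j s).foldl (fun c ch => c.insert ch (c.getD ch 0 + 1)) c0 := by
  induction j generalizing s c0 with
  | nil => simp [PySem.List.enumerate_nil, pvRowChars]
  | cons a j ih =>
    rw [PySem.List.enumerate_cons]
    simp only [List.foldl_cons]
    by_cases hcond : a ≠ 0 ∧ s ≠ x
    · rw [if_pos hcond]
      rw [ih (s+1)]
      have hrow : pvRowChars d1 x (a :: j) s = (d1.getD s "").toList ++ pvRowChars d1 x j (s+1) := by
        unfold pvRowChars
        rw [PySem.List.enumerate_cons]
        simp [hcond.1, hcond.2]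
      rw [hrow, List.foldl_append]
    · rw [if_neg hcond]
      rw [ih (s+1)]
      have hrow : pvRowChars d1 x (a :: j) s = pvRowChars d1 x j (s+1) := by
        unfold pvRowChars
        rw [PySem.List.enumerate_cons]
        rcases Decidable.not_and_iff_not_or_not.mp hcond with h1 | h1 <;>
          simp at h1 <;> simp [h1]
      rw [hrow]

lemma pv_count_flatMap (ks : List Char) (m : Char → Nat) (hnd : ks.Nodup) (c : Char) :
    (ks.flatMap (fun ch => List.replicate (m ch) ch)).count c = if c ∈ ks then m c else 0 := by
  induction ks with
  | nil => simp
  | cons k ks ih =>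
    simp only [List.flatMap_cons, List.count_append]
    rw [ih hnd.of_cons]
    have hk : k ∉ ks := (List.nodup_cons.mp hnd).1
    by_cases hc : c = k
    · subst hc
      simp [hk]
    · have : (k == c) = false := by simp [Ne.symm hc]
      simp [List.count_replicate, this, hc]

lemma pv_pairwise_flatMap (ks : List Char) (m : Char → Nat) (h : ks.Pairwise (· < ·)) :
    (ks.flatMap (fun ch => List.replicate (m ch) ch)).Pairwise (· ≤ ·) := by
  induction ks with
  | nil => simp
  | cons k ks ih =>
    simp only [List.flatMap_cons]
    rw [List.pairwise_append]
    refine ⟨List.pairwise_replicate.mpr (by simp), ih h.of_cons, ?_⟩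
    intro a ha b hb
    rw [List.eq_of_mem_replicate ha]
    obtain ⟨k', hk', hbk'⟩ := List.mem_flatMap.mp hb
    rw [List.eq_of_mem_replicate hbk']
    exact le_of_lt ((List.pairwise_cons.mp h).1 k' hk')

lemma pv_countsort (l : List Char) :
    ((PySem.List.sorted (PySem.Dict.counter l).keys (fun c => c) false).flatMap
       (fun ch => List.replicate ((PySem.Dict.counter l).getD ch 0).toNat ch))
      = PySem.List.sorted l (fun c => c) false := by
  have hkeys : (PySem.Dict.counter l).keys = PySem.Set.ofList l := PySem.Dict.keys_counter l
  have hget : ∀ ch, ((PySem.Dict.counter l).getD ch 0).toNat = l.count ch := by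
    intro ch
    rw [PySem.Dict.getD_counter]
    exact Int.toNat_natCast _
  set ks := PySem.List.sorted (PySem.Set.ofList l) (fun c => c) false with hks
  have hndks : ks.Nodup := (PySem.List.sorted_perm _ _ _).nodup_iff.mpr (PySem.Set.nodup_ofList l)
  have hmem : ∀ c, c ∈ ks ↔ c ∈ l := by
    intro c
    rw [hks, PySem.List.mem_sorted, PySem.Set.mem_ofList]
  refine (PySem.List.sorted_id_eq_of_perm_of_pairwise l _ ?_ ?_).symm
  · rw [List.perm_iff_count]
    intro c
    rw [hkeys]
    rw [pv_count_flatMap ks (fun ch => ((PySem.Dict.counter l).getD ch 0).toNat) hndks c]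
    by_cases hc : c ∈ l
    · rw [if_pos ((hmem c).mpr hc), hget]
    · rw [if_neg (fun h => hc ((hmem c).mp h))]
      exact (List.count_eq_zero_of_not_mem hc).symm
  · rw [hkeys]
    exact pv_pairwise_flatMap ks _ (PySem.List.sorted_ofList_pairwise_lt l)


def pvPhase1 (G1 : List (Int × String)) (adj1 : List (List Int)) : PySem.Dict Int String :=
  (PySem.List.enumerate adj1).foldl (fun G xj =>
    (PySem.List.enumerate xj.2).foldl (fun G yk =>
      if yk.2 ≠ 0 then
        if xj.1 == yk.1 then G
        else G.insert xj.1 (G.getD xj.1 "" ++ (PySem.Dict.mk G1).getD yk.1 "")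
      else G) G) (PySem.Dict.mk G1)

def pvBcnt (G1 : List (Int × String)) (adj1 : List (List Int)) (xl : Int × String) : PySem.Dict Char Int :=
  let cnt : PySem.Dict Char Int :=
    xl.2.toList.foldl (fun c ch => c.insert ch (c.getD ch 0 + 1)) PySem.Dict.empty
  if 0 ≤ xl.1 ∧ xl.1 < (adj1.length : Int) then
    (PySem.List.enumerate (PySem.List.pyGetD adj1 xl.1 [])).foldl (fun c yk =>
      if yk.2 ≠ 0 ∧ yk.1 ≠ xl.1 then
        ((PySem.Dict.mk G1).getD yk.1 "").toList.foldl (fun c ch => c.insert ch (c.getD ch 0 + 1)) c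
      else c) cnt
  else cnt

def pvBval (G1 : List (Int × String)) (adj1 : List (List Int)) (xl : Int × String) : String :=
  String.ofList ((PySem.List.sorted (pvBcnt G1 adj1 xl).keys (fun c => c) false).flatMap
    (fun ch => List.replicate ((pvBcnt G1 adj1 xl).getD ch 0).toNat ch))

theorem pv_main (G1 : List (Int × String)) (adj1 : List (List Int))
    (hnd : (G1.map Prod.fst).Nodup)
    (hP : ∀ p ∈ PySem.List.enumerate adj1, ∀ q ∈ PySem.List.enumerate p.2,
      q.2 ≠ 0 → q.1 ≠ p.1 → p.1 ∈ G1.map Prod.fst ∧ q.1 ∈ G1.map Prod.fst) :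
    multi_labeling G1 adj1 = multi_labeling_alt G1 adj1 := by
  have hA : multi_labeling G1 adj1 = ((pvPhase1 G1 adj1).keys.foldl (fun G i =>
      G.insert i (String.ofList (PySem.List.sorted (G.getD i "").toList (fun c => c) false))) (pvPhase1 G1 adj1)).items := rfl
  have hB : multi_labeling_alt G1 adj1 = (G1.foldl (fun out xl => out.insert xl.1 (pvBval G1 adj1 xl)) (PySem.Dict.empty : PySem.Dict Int String)).items := rfl
  rw [hA, hB]
  have hkeys1 : (PySem.Dict.mk G1).keys = G1.map (fun x => x.1) := PySem.Dict.keys_mk G1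
  have hnd1 : (G1.map (fun x => x.1)).Nodup := hnd
  have houter := pv_outerA (PySem.Dict.mk G1) adj1 0 (PySem.Dict.mk G1) rfl
      (fun p hp q hq h1 h2 => by rw [hkeys1]; exact (hP p hp q hq h1 h2).1)
  have hk1 : (pvPhase1 G1 adj1).keys = (PySem.Dict.mk G1).keys := houter.1
  have hv1 : ∀ z, ((pvPhase1 G1 adj1).getD z "").toList
      = ((PySem.Dict.mk G1).getD z "").toList ++ pvNbChars (PySem.Dict.mk G1) adj1 0 z := houter.2
  have hndk : (pvPhase1 G1 adj1).keys.Nodup := by rw [hk1, hkeys1]; exact hnd1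
  obtain ⟨hk2, hv2, _⟩ := pv_sortPass (pvPhase1 G1 adj1).keys (pvPhase1 G1 adj1) hndk (fun i hi => hi)
  have hndF : ((pvPhase1 G1 adj1).keys.foldl (fun G i =>
      G.insert i (String.ofList (PySem.List.sorted (G.getD i "").toList (fun c => c) false))) (pvPhase1 G1 adj1)).keys.Nodup := by
    rw [hk2]; exact hndk
  rw [PySem.Dict.items_eq_map_keys _ hndF ""]
  have hBitems : (G1.foldl (fun out xl => out.insert xl.1 (pvBval G1 adj1 xl)) (PySem.Dict.empty : PySem.Dict Int String)).items
      = G1.map (fun a => (a.1, pvBval G1 adj1 a)) := by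
    have h := PySem.Dict.items_foldl_insert_fresh G1 (fun a => a.1) (fun a => pvBval G1 adj1 a)
      (PySem.Dict.empty : PySem.Dict Int String)
      (fun a _ => PySem.Dict.contains_empty _) hnd1
    simpa using h
  have hkeysF := hk2.trans (hk1.trans hkeys1)
  rw [hBitems, hkeysF, List.map_map]
  apply List.map_congr_left
  intro p hp
  have hmem : p.1 ∈ (pvPhase1 G1 adj1).keys := by
    rw [hk1, hkeys1]
    exact List.mem_map_of_mem hp
  have hFv := hv2 p.1 hmem
  have hd1p : (PySem.Dict.mk G1).getD p.1 "" = p.2 :=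
    PySem.Dict.getD_of_mem_items _ hp hnd ""
  have hnb := pv_nbChars_closed (PySem.Dict.mk G1) adj1 0 p.1
  by_cases hg : 0 ≤ p.1 ∧ p.1 < (adj1.length : Int)
  · have hcond : (0:Int) ≤ p.1 ∧ p.1 < 0 + (adj1.length : Int) := by omega
    have hsub0 : p.1 - 0 = p.1 := by omega
    rw [if_pos hcond, hsub0] at hnb
    have hcnt : pvBcnt G1 adj1 p = PySem.Dict.counter (p.2.toList ++ pvRowChars (PySem.Dict.mk G1) p.1 (adj1.getD p.1.toNat []) 0) := by
      unfold pvBcnt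
      rw [if_pos hg, PySem.List.pyGetD_of_nonneg _ _ hg.1, pv_innerB, ← List.foldl_append]
      exact PySem.Dict.foldl_insert_getD_add_one_eq_counter _
    have hBv : pvBval G1 adj1 p = String.ofList (PySem.List.sorted (p.2.toList ++ pvRowChars (PySem.Dict.mk G1) p.1 (adj1.getD p.1.toNat []) 0) (fun c => c) false) := by
      unfold pvBval
      rw [hcnt, pv_countsort]
    have hchars : ((pvPhase1 G1 adj1).getD p.1 "").toList = p.2.toList ++ pvRowChars (PySem.Dict.mk G1) p.1 (adj1.getD p.1.toNat []) 0 := by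
      rw [hv1 p.1, hd1p, hnb]
    simp only [Function.comp]
    rw [hFv, hchars, hBv]
  · have hcond : ¬ ((0:Int) ≤ p.1 ∧ p.1 < 0 + (adj1.length : Int)) := by omega
    rw [if_neg hcond] at hnb
    have hcnt : pvBcnt G1 adj1 p = PySem.Dict.counter p.2.toList := by
      unfold pvBcnt
      rw [if_neg hg]
      exact PySem.Dict.foldl_insert_getD_add_one_eq_counter _
    have hBv : pvBval G1 adj1 p = String.ofList (PySem.List.sorted p.2.toList (fun c => c) false) := by
      unfold pvBval
      rw [hcnt, pv_countsort]
    have hchars : ((pvPhase1 G1 adj1).getD p.1 "").toList = p.2.toList := by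
      rw [hv1 p.1, hd1p, hnb, List.append_nil]
    simp only [Function.comp]
    rw [hFv, hchars, hBv]

-- ===== VERDICT (by name: the statement is the Claim_ definition above) =====
theorem multi_labeling_spec : Claim_equal_multi_labeling := by
  intro G1 adj1 _ hpre
  show multi_labeling G1 adj1 = multi_labeling_alt G1 adj1
  exact pv_main G1 adj1 hpre.1 hpre.2
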